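-- pv_equiv track=rewrite | github.com/Chocco-Crokko/Game_theory | lab3/nash_pareto.py | is_strictly_dominate
-- ===== SOURCE A (Python) =====
-- def is_strictly_dominate(a, b):
--     strictly_more = False
--     for i in range(len(a)):
--         if a[i] < b[i]:
--             return False
--         elif a[i] > b[i]:
--             strictly_more = True
--     return strictly_more
-- ===== SOURCE B (Python) =====
-- def is_strictly_dominate(a, b):
--     diffs = [a[i] - b[i] for i in range(len(a))]
--     return bool(diffs) and min(diffs) >= 0 and max(diffs) > 0
-- ===== Notes on version B (the rewrite author's own statement) =====
-- stated objective: alternative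
-- what changed: Reduces dominance to extremal statistics of the difference vector: build diffs = a - b once, then test min(diffs) >= 0 and max(diffs) > 0, instead of A's stateful early-return loop with a flag.
-- outside the precondition, e.g. on is_strictly_dominate([0, 5], [1]): A returns False, B raises IndexError
import Mathlib
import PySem

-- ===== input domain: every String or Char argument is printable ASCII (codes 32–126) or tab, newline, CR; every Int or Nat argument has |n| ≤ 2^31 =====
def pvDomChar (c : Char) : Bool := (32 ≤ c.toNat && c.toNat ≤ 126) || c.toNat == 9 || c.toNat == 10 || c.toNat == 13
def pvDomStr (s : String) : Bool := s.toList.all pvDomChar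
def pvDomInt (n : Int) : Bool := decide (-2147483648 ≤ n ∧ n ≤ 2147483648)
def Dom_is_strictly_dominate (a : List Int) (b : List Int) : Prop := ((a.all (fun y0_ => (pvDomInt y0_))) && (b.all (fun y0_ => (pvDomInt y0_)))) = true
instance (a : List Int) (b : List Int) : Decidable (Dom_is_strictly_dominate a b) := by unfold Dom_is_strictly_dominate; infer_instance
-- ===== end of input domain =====

-- B builds the difference vector a - b once and decides dominance from its extremal
-- statistics (min ≥ 0 and max > 0) instead of A's stateful early-return loop with a flag.

-- ===== PORT A =====
-- the Python for-loop with early return and the strictly_more flag; index i walks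
-- 0..len(a)-1, fuel counts remaining iterations (out-of-range reads default to 0 —
-- those inputs are excluded by Pre_; in Python they are an IndexError)
def isdLoopA (a : List Int) (b : List Int) : Nat → Nat → Bool → Bool
  | _, 0, strictly_more => strictly_more
  | i, fuel + 1, strictly_more =>
    let ai := a.getD i 0
    let bi := b.getD i 0
    if ai < bi then false
    else isdLoopA a b (i + 1) fuel (if ai > bi then true else strictly_more)

def is_strictly_dominate (a : List Int) (b : List Int) : Bool :=
  isdLoopA a b 0 a.length false

-- ===== PORT B =====
-- diffs = [a[i] - b[i] for i in range(len(a))]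
-- return bool(diffs) and min(diffs) >= 0 and max(diffs) > 0
def is_strictly_dominate_alt (a : List Int) (b : List Int) : Bool :=
  let diffs := (List.range a.length).map fun i => a.getD i 0 - b.getD i 0
  !diffs.isEmpty &&
    (match PySem.List.min? diffs (fun x => x) with
     | some m => decide (0 ≤ m)
     | none => false) &&
    (match PySem.List.max? diffs (fun x => x) with
     | some m => decide (0 < m)
     | none => false)

-- ===== PRECONDITION & SPEC =====
-- Pre_ excludes len(a) > len(b): there Python A raises IndexError unless an earlier
-- coordinate returns False first, and B (which builds the whole difference list before
-- testing anything) always raises IndexError, so the two cannot be compared as values.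
def Pre_is_strictly_dominate (a : List Int) (b : List Int) : Prop :=
  a.length ≤ b.length
instance (a : List Int) (b : List Int) : Decidable (Pre_is_strictly_dominate a b) := by
  unfold Pre_is_strictly_dominate; infer_instance

def pvWitness_is_strictly_dominate : List Int × List Int := ([3, 2], [1, 2])

def Spec_is_strictly_dominate (a : List Int) (b : List Int) (out : Bool) : Prop := out = is_strictly_dominate_alt a b
instance (a : List Int) (b : List Int) (out : Bool) : Decidable (Spec_is_strictly_dominate a b out) := by unfold Spec_is_strictly_dominate; infer_instance

-- ===== CLAIM =====
def Claim_equal_is_strictly_dominate : Prop := ∀ (a : List Int) (b : List Int), Dom_is_strictly_dominate a b → Pre_is_strictly_dominate a b → Spec_is_strictly_dominate a b (is_strictly_dominate a b)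

-- ===== LEMMAS AND PROOFS =====

-- loop invariant for A: the loop over indices [i, i+fuel) equals "all ≥ on that window"
-- && ("any > on that window" || the incoming flag)
theorem isdLoopA_eq (a b : List Int) :
    ∀ (fuel i : Nat) (sm : Bool),
      isdLoopA a b i fuel sm =
        (((List.range' i fuel).all fun j => a.getD j 0 ≥ b.getD j 0) &&
         (((List.range' i fuel).any fun j => a.getD j 0 > b.getD j 0) || sm)) := by
  intro fuel
  induction fuel with
  | zero => intro i sm; simp [isdLoopA]
  | succ n ih =>
    intro i sm
    simp only [isdLoopA, List.range'_succ, List.all_cons, List.any_cons,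
      List.getD_eq_getElem?_getD, ge_iff_le, gt_iff_lt] at ih ⊢
    by_cases hlt : a[i]?.getD 0 < b[i]?.getD 0
    · simp [hlt]
    · have hge : b[i]?.getD 0 ≤ a[i]?.getD 0 := not_lt.mp hlt
      rw [if_neg hlt, ih]
      by_cases hgt : b[i]?.getD 0 < a[i]?.getD 0
      · simp [hgt, hge]
      · simp [hgt, hge]

-- min(xs) ≥ 0 on a nonempty list is exactly "all elements ≥ 0"
theorem min?_nonneg_iff_all (xs : List Int) (m : Int)
    (h : PySem.List.min? xs (fun x => x) = some m) :
    (0 ≤ m) ↔ ∀ x ∈ xs, 0 ≤ x := by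
  constructor
  · intro hm x hx
    exact hm.trans (PySem.List.min?_isMin h x hx)
  · intro hall
    exact hall m (PySem.List.min?_mem h)

-- max(xs) > 0 on a nonempty list is exactly "some element > 0"
theorem max?_pos_iff_any (xs : List Int) (m : Int)
    (h : PySem.List.max? xs (fun x => x) = some m) :
    (0 < m) ↔ ∃ x ∈ xs, 0 < x := by
  constructor
  · intro hm
    exact ⟨m, PySem.List.max?_mem h, hm⟩
  · rintro ⟨x, hx, hpos⟩
    exact hpos.trans_le (PySem.List.max?_isMax h x hx)

-- ===== VERDICT =====
theorem is_strictly_dominate_spec : Claim_equal_is_strictly_dominate := by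
  intro a b _ _
  unfold Spec_is_strictly_dominate is_strictly_dominate is_strictly_dominate_alt
  rw [isdLoopA_eq, List.range_eq_range']
  cases hlen : a.length with
  | zero => simp [hlen]
  | succ n =>
    have hie : ((List.range' 0 (n+1)).map fun i => a.getD i 0 - b.getD i 0).isEmpty = false := by
      simp [List.range'_succ]
    obtain ⟨mn, hmn⟩ : ∃ m, PySem.List.min? ((List.range' 0 (n+1)).map fun i => a.getD i 0 - b.getD i 0) (fun x => x) = some m := by
      cases h : PySem.List.min? ((List.range' 0 (n+1)).map fun i => a.getD i 0 - b.getD i 0) (fun x => x) with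
      | none => exact absurd ((PySem.List.min?_eq_none_iff _ _).mp h) (by simp [List.range'_succ])
      | some m => exact ⟨m, rfl⟩
    obtain ⟨mx, hmx⟩ : ∃ m, PySem.List.max? ((List.range' 0 (n+1)).map fun i => a.getD i 0 - b.getD i 0) (fun x => x) = some m := by
      cases h : PySem.List.max? ((List.range' 0 (n+1)).map fun i => a.getD i 0 - b.getD i 0) (fun x => x) with
      | none => exact absurd ((PySem.List.max?_eq_none_iff _ _).mp h) (by simp [List.range'_succ])
      | some m => exact ⟨m, rfl⟩
    simp only [hmn, hmx, hie]
    rw [Bool.eq_iff_iff]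
    simp only [Bool.and_eq_true, Bool.or_false, List.all_eq_true, List.any_eq_true,
      decide_eq_true_eq, Bool.not_false, Bool.true_and,
      min?_nonneg_iff_all _ _ hmn, max?_pos_iff_any _ _ hmx, List.mem_map]
    constructor
    · rintro ⟨hall, j, hj, hgt⟩
      refine ⟨fun x ⟨j, hj, hx⟩ => ?_, ⟨_, ⟨j, hj, rfl⟩, ?_⟩⟩
      · have := hall j hj; omega
      · have := hall j hj; omega
    · rintro ⟨hall, x, ⟨j, hj, rfl⟩, hpos⟩
      refine ⟨fun j hj => ?_, j, hj, by omega⟩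
      have := hall _ ⟨j, hj, rfl⟩; omega
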